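-- pv_equiv track=rewrite | github.com/M1roshi/Labs | lab6/lab6.py | algorithmic_solution
-- ===== SOURCE A (Python) =====
-- def algorithmic_solution(women, men):
--     # Перебор женщин для посудомоек
--     dishwashers = []
--     for i in range(len(women)):
--         for j in range(i+1, len(women)):
--             dishwashers.append([women[i], women[j]])
--
--     # Перебор мужчин для грузчиков
--     loaders = []
--     for i in range(len(men)):
--         for j in range(i+1, len(men)):
--             for k in range(j+1, len(men)):
--                 for l in range(k+1, len(men)):
--                     for m in range(l+1, len(men)):
--                         loaders.append([men[i], men[j], men[k], men[l], men[m]])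
--
--     # Формируем все возможные варианты для официантов
--     all_workers = women + men
--     waiters_combinations = []
--     for i in range(len(all_workers)):
--         for j in range(i+1, len(all_workers)):
--             for k in range(j+1, len(all_workers)):
--                 for l in range(k+1, len(all_workers)):
--                     for m in range(l+1, len(all_workers)):
--                         waiters_combinations.append([all_workers[i], all_workers[j], all_workers[k], all_workers[l], all_workers[m]])
--
--     return dishwashers, loaders, waiters_combinations
-- ===== SOURCE B (Python) =====
-- def _combs(lst, k):
--     # all k-element combinations of lst, in index-lexicographic order
--     if k == 0:
--         return [[]]
--     if not lst:
--         return []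
--     head, tail = lst[0], lst[1:]
--     return [[head] + rest for rest in _combs(tail, k - 1)] + _combs(tail, k)
--
--
-- def algorithmic_solution(women, men):
--     return _combs(women, 2), _combs(men, 5), _combs(women + men, 5)
-- ===== Notes on version B (the rewrite author's own statement) =====
-- stated objective: simpler
-- what changed: The three hand-unrolled nested index-loop blocks (2-deep and two 5-deep) are replaced by one recursive helper _combs(lst, k) that builds k-combinations structurally (take head or skip it), applied with k=2 and k=5.
import Mathlib
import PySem

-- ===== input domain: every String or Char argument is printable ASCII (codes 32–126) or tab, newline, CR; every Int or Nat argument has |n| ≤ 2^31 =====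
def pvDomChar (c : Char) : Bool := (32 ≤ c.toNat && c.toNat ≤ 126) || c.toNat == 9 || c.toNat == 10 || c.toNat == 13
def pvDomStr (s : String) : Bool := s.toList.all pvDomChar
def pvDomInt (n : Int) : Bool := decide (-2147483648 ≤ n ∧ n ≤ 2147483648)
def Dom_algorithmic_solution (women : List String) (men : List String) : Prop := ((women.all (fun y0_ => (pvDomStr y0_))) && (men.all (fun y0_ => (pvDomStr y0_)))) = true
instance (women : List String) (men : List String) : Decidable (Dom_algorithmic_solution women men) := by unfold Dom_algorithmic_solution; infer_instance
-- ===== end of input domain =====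

-- B replaces A's three hand-unrolled nested index-loop blocks by one recursive
-- k-combinations helper (objective: simpler); same values, same order.

-- ===== PORT A =====
-- transliteration of A: nested index loops 'for j in range(i+1, len(L))' appending lists
def algorithmic_solution (women : List String) (men : List String) : List (List String) × List (List String) × List (List String) :=
  let dishwashers :=
    (PySem.List.pyRange 0 (women.length : Int) 1).foldl (fun acc i =>
      (PySem.List.pyRange (i + 1) (women.length : Int) 1).foldl (fun acc j =>
        acc ++ [[PySem.List.pyGetD women i "", PySem.List.pyGetD women j ""]]) acc) []
  let loaders :=
    (PySem.List.pyRange 0 (men.length : Int) 1).foldl (fun acc i =>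
      (PySem.List.pyRange (i + 1) (men.length : Int) 1).foldl (fun acc j =>
        (PySem.List.pyRange (j + 1) (men.length : Int) 1).foldl (fun acc k =>
          (PySem.List.pyRange (k + 1) (men.length : Int) 1).foldl (fun acc l =>
            (PySem.List.pyRange (l + 1) (men.length : Int) 1).foldl (fun acc m =>
              acc ++ [[PySem.List.pyGetD men i "", PySem.List.pyGetD men j "",
                       PySem.List.pyGetD men k "", PySem.List.pyGetD men l "",
                       PySem.List.pyGetD men m ""]]) acc) acc) acc) acc) []
  let all_workers := women ++ men
  let waiters_combinations :=
    (PySem.List.pyRange 0 (all_workers.length : Int) 1).foldl (fun acc i =>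
      (PySem.List.pyRange (i + 1) (all_workers.length : Int) 1).foldl (fun acc j =>
        (PySem.List.pyRange (j + 1) (all_workers.length : Int) 1).foldl (fun acc k =>
          (PySem.List.pyRange (k + 1) (all_workers.length : Int) 1).foldl (fun acc l =>
            (PySem.List.pyRange (l + 1) (all_workers.length : Int) 1).foldl (fun acc m =>
              acc ++ [[PySem.List.pyGetD all_workers i "", PySem.List.pyGetD all_workers j "",
                       PySem.List.pyGetD all_workers k "", PySem.List.pyGetD all_workers l "",
                       PySem.List.pyGetD all_workers m ""]]) acc) acc) acc) acc) []
  (dishwashers, loaders, waiters_combinations)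

-- ===== PORT B =====
-- transliteration of Source B's _combs: k = 0 → [[]]; empty list → []; else head-included ++ head-skipped
def pvCombs : List String → Nat → List (List String)
  | _, 0 => [[]]
  | [], _ + 1 => []
  | x :: xs, k + 1 => ((pvCombs xs k).map (fun rest => x :: rest)) ++ pvCombs xs (k + 1)

def algorithmic_solution_alt (women : List String) (men : List String) : List (List String) × List (List String) × List (List String) :=
  (pvCombs women 2, pvCombs men 5, pvCombs (women ++ men) 5)

-- ===== PRECONDITION & SPEC =====
def Spec_algorithmic_solution (women : List String) (men : List String) (out : List (List String) × List (List String) × List (List String)) : Prop := out = algorithmic_solution_alt women men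
instance (women : List String) (men : List String) (out : List (List String) × List (List String) × List (List String)) : Decidable (Spec_algorithmic_solution women men out) := by unfold Spec_algorithmic_solution; infer_instance

-- ===== CLAIM (what is proved, stated in full; the proofs are below) =====
def Claim_equal_algorithmic_solution : Prop := ∀ (women : List String) (men : List String), Dom_algorithmic_solution women men → Spec_algorithmic_solution women men (algorithmic_solution women men)

-- ===== LEMMAS AND PROOFS =====

-- proof-side: A's nested loops, depth d, prefix pre, next index ≥ a
def pvLoopN : Nat → List String → Int → List String → List (List String)
  | 0, pre, _, _ => [pre]
  | d + 1, pre, a, L =>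
      (PySem.List.pyRange a (L.length : Int) 1).flatMap
        (fun i => pvLoopN d (pre ++ [PySem.List.pyGetD L i ""]) (i + 1) L)

lemma pvLoopN_succ (d : Nat) (pre : List String) (a : Int) (L : List String) :
    pvLoopN (d + 1) pre a L =
      (PySem.List.pyRange a (L.length : Int) 1).flatMap
        (fun i => pvLoopN d (pre ++ [PySem.List.pyGetD L i ""]) (i + 1) L) := rfl

lemma pvLoopN_eq (d : Nat) : ∀ (pre : List String) (a : Int), 0 ≤ a →
    ∀ (L : List String), pvLoopN d pre a L = (pvCombs (L.drop a.toNat) d).map (fun c => pre ++ c) := by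
  induction d with
  | zero => intro pre a _ L; simp [pvLoopN, pvCombs]
  | succ d ih =>
    intro pre a ha L
    -- inner induction on the remaining length
    have main : ∀ (m : Nat) (a : Int), 0 ≤ a → m = L.length - a.toNat →
        pvLoopN (d + 1) pre a L = (pvCombs (L.drop a.toNat) (d + 1)).map (fun c => pre ++ c) := by
      intro m
      induction m with
      | zero =>
        intro a ha hm
        have hla : L.length ≤ a.toNat := by omega
        have hnil : L.drop a.toNat = [] := List.drop_eq_nil_of_le hla
        have hr : PySem.List.pyRange a (L.length : Int) 1 = [] := by
          apply PySem.List.pyRange_one_eq_nil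
          omega
        rw [pvLoopN_succ, hr, hnil]
        simp [pvCombs]
      | succ m ihm =>
        intro a ha hm
        have hlt : a.toNat < L.length := by omega
        have haL : a < (L.length : Int) := by omega
        have hcons : L.drop a.toNat = L[a.toNat] :: L.drop (a.toNat + 1) :=
          List.drop_eq_getElem_cons hlt
        have hget : PySem.List.pyGetD L a "" = L[a.toNat] :=
          PySem.List.pyGetD_eq_getElem L "" ha haL
        rw [pvLoopN_succ, PySem.List.pyRange_one_cons haL, List.flatMap_cons]
        rw [ih (pre ++ [PySem.List.pyGetD L a ""]) (a + 1) (by omega) L]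
        rw [← pvLoopN_succ d pre (a + 1) L, ihm (a + 1) (by omega) (by omega)]
        have htonat : (a + 1).toNat = a.toNat + 1 := by omega
        rw [htonat, hcons, hget]
        simp [pvCombs, List.map_map, Function.comp]
    exact main (L.length - a.toNat) a ha rfl

-- A's foldl blocks rewritten as pvLoopN (flatMap form)
lemma pv_A_eq_loopN (women men : List String) :
    algorithmic_solution women men =
      (pvLoopN 2 [] 0 women, pvLoopN 5 [] 0 men, pvLoopN 5 [] 0 (women ++ men)) := by
  show _ = (pvLoopN (1+1) [] 0 women, pvLoopN (4+1) [] 0 men, pvLoopN (4+1) [] 0 (women ++ men))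
  simp only [algorithmic_solution, pvLoopN, PySem.List.foldl_append_eq_flatMap,
    List.nil_append, List.cons_append]

-- ===== VERDICT (by name: the statement is the Claim_ definition above) =====
theorem algorithmic_solution_spec : Claim_equal_algorithmic_solution := by
  intro women men _
  unfold Spec_algorithmic_solution algorithmic_solution_alt
  rw [pv_A_eq_loopN]
  rw [pvLoopN_eq 2 [] 0 le_rfl women, pvLoopN_eq 5 [] 0 le_rfl men,
      pvLoopN_eq 5 [] 0 le_rfl (women ++ men)]
  simp
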